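-- pv_equiv track=rewrite | github.com/alexandraback/datacollection | solutions_5686313294495744_0/Python/eidanch/C.py | relatively_fake
-- ===== SOURCE A (Python) =====
-- def relatively_fake(pair, lst):
--     w1, w2 = pair
--     mark1, mark2 = False, False
--     for z1, z2 in lst:
--         if (w1,w2) == (z1,z2):
--             continue
--         if w1 == z1:
--             mark1 = True
--         if w2 == z2:
--             mark2 = True
--     return mark1 and mark2
-- ===== SOURCE B (Python) =====
-- def relatively_fake(pair, lst):
--     exact = lst.count(pair)
--     firsts = [z1 for z1, _ in lst]
--     seconds = [z2 for _, z2 in lst]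
--     return firsts.count(pair[0]) > exact and seconds.count(pair[1]) > exact
-- ===== Notes on version B (the rewrite author's own statement) =====
-- stated objective: alternative
-- what changed: Replaces A's flag-setting scan with a counting formulation: compare the multiplicity of the first/second coordinate against the multiplicity of the exact pair, so the result is arithmetic over counts rather than boolean flags from a loop.
import Mathlib
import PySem

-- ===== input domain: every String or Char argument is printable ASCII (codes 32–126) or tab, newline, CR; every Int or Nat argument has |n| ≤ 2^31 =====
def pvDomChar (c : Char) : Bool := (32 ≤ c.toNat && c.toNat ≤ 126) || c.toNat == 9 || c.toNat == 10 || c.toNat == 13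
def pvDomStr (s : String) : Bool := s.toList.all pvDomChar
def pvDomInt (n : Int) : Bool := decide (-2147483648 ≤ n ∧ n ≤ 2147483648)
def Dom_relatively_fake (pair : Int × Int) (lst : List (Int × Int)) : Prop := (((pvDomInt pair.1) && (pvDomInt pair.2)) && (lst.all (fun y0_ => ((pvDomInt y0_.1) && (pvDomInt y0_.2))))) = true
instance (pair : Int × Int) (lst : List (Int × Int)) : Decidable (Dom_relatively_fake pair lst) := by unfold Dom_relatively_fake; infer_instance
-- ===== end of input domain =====

-- ===== PORT A =====
-- One honest line: B replaces A's flag-setting scan by a counting formulation (coordinate multiplicities vs exact-pair multiplicity); alternative, same cost.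
def rfLoop (w1 w2 : Int) (st : Bool × Bool) (lst : List (Int × Int)) : Bool × Bool :=
  lst.foldl (fun st z =>
    if (w1, w2) = (z.1, z.2) then st
    else
      (if w1 = z.1 then true else st.1,
       if w2 = z.2 then true else st.2)) st

def relatively_fake (pair : Int × Int) (lst : List (Int × Int)) : Bool :=
  let st := rfLoop pair.1 pair.2 (false, false) lst
  st.1 && st.2

-- ===== PORT B =====
def relatively_fake_alt (pair : Int × Int) (lst : List (Int × Int)) : Bool :=
  let exact := PySem.List.count lst pair
  let firsts := lst.map (fun z => z.1)
  let seconds := lst.map (fun z => z.2)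
  decide (PySem.List.count firsts pair.1 > exact) && decide (PySem.List.count seconds pair.2 > exact)

-- ===== PRECONDITION & SPEC =====
def Spec_relatively_fake (pair : Int × Int) (lst : List (Int × Int)) (out : Bool) : Prop := out = relatively_fake_alt pair lst
instance (pair : Int × Int) (lst : List (Int × Int)) (out : Bool) : Decidable (Spec_relatively_fake pair lst out) := by unfold Spec_relatively_fake; infer_instance

-- ===== CLAIM (what is proved, stated in full; the proofs are below) =====
def Claim_equal_relatively_fake : Prop := ∀ (pair : Int × Int) (lst : List (Int × Int)), Dom_relatively_fake pair lst → Spec_relatively_fake pair lst (relatively_fake pair lst)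

-- ===== LEMMAS AND PROOFS =====
lemma rfLoop_eq (w1 w2 : Int) (m1 m2 : Bool) (lst : List (Int × Int)) :
    rfLoop w1 w2 (m1, m2) lst =
      (m1 || lst.any (fun z => z.1 = w1 && !((z.1, z.2) = (w1, w2) : Bool)),
       m2 || lst.any (fun z => z.2 = w2 && !((z.1, z.2) = (w1, w2) : Bool))) := by
  induction lst generalizing m1 m2 with
  | nil => simp [rfLoop]
  | cons z tl ih =>
    simp only [rfLoop] at ih ⊢
    rw [List.foldl_cons]
    by_cases h : (w1, w2) = (z.1, z.2)
    · rw [if_pos h, ih]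
      have hz : z = (w1, w2) := by obtain ⟨a, b⟩ := z; simpa using h.symm
      simp [List.any_cons, hz]
    · rw [if_neg h, ih]
      have d : decide (z = (w1, w2)) = false := by
        refine decide_eq_false (fun he => h ?_)
        obtain ⟨a, b⟩ := z; simpa using he.symm
      have c1 : (decide (z.1 = w1)) = (decide (w1 = z.1)) := by simp [eq_comm]
      have c2 : (decide (z.2 = w2)) = (decide (w2 = z.2)) := by simp [eq_comm]
      simp only [List.any_cons, d, Bool.not_false, Bool.and_true, c1, c2]
      by_cases e1 : w1 = z.1 <;> by_cases e2 : w2 = z.2 <;>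
        simp [e1, e2]

-- the existence check "some element has first coord w1 and is not the exact pair"
-- is equivalent to "count of first coords equal w1 exceeds count of the exact pair"
lemma any_iff_count1 (w1 w2 : Int) (lst : List (Int × Int)) :
    lst.any (fun z => z.1 = w1 && !((z.1, z.2) = (w1, w2) : Bool)) =
      decide (PySem.List.count (lst.map (fun z => z.1)) w1 > PySem.List.count lst (w1, w2)) := by
  induction lst with
  | nil => simp [PySem.List.count]
  | cons z tl ih =>
    obtain ⟨a, b⟩ := z
    by_cases hz : (a, b) = (w1, w2)
    · obtain ⟨h1, h2⟩ := Prod.mk.injEq a b w1 w2 ▸ hz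
      subst h1; subst h2
      simp only [List.any_cons, List.map_cons, PySem.List.count_eq, List.count_cons] at ih ⊢
      rcases Bool.eq_false_or_eq_true (tl.any (fun z => z.1 = a && !((z.1, z.2) = (a, b) : Bool))) with h | h <;>
        rw [h] at ih ⊢ <;> simp at ih ⊢ <;> omega
    · have ha : (decide ((a, b) = (w1, w2))) = false := by simp [hz]
      simp only [List.any_cons, List.map_cons, PySem.List.count_eq, List.count_cons] at ih ⊢
      by_cases h1 : a = w1
      · subst h1
        simp [hz]
        have : List.count (a, w2) tl ≤ List.count a (tl.map (fun z => z.1)) := by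
          simpa using List.count_le_count_map (l := tl) (f := fun z : Int × Int => z.1) (x := (a, w2))
        omega
      · simp only [ha, Bool.not_false, Bool.and_true]
        have : (decide (a = w1)) = false := by simp [h1]
        rw [this]
        simp only [Bool.false_or]
        rw [ih]
        simp [h1, hz]

lemma any_iff_count2 (w1 w2 : Int) (lst : List (Int × Int)) :
    lst.any (fun z => z.2 = w2 && !((z.1, z.2) = (w1, w2) : Bool)) =
      decide (PySem.List.count (lst.map (fun z => z.2)) w2 > PySem.List.count lst (w1, w2)) := by
  induction lst with
  | nil => simp [PySem.List.count]
  | cons z tl ih =>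
    obtain ⟨a, b⟩ := z
    by_cases hz : (a, b) = (w1, w2)
    · obtain ⟨h1, h2⟩ := Prod.mk.injEq a b w1 w2 ▸ hz
      subst h1; subst h2
      simp only [List.any_cons, List.map_cons, PySem.List.count_eq, List.count_cons] at ih ⊢
      rcases Bool.eq_false_or_eq_true (tl.any (fun z => z.2 = b && !((z.1, z.2) = (a, b) : Bool))) with h | h <;>
        rw [h] at ih ⊢ <;> simp at ih ⊢ <;> omega
    · have ha : (decide ((a, b) = (w1, w2))) = false := by simp [hz]
      simp only [List.any_cons, List.map_cons, PySem.List.count_eq, List.count_cons] at ih ⊢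
      by_cases h2 : b = w2
      · subst h2
        simp [hz]
        have : List.count (w1, b) tl ≤ List.count b (tl.map (fun z => z.2)) := by
          simpa using List.count_le_count_map (l := tl) (f := fun z : Int × Int => z.2) (x := (w1, b))
        omega
      · simp only [ha, Bool.not_false, Bool.and_true]
        have : (decide (b = w2)) = false := by simp [h2]
        rw [this]
        simp only [Bool.false_or]
        rw [ih]
        simp [h2, hz]

-- ===== VERDICT (by name: the statement is the Claim_ definition above) =====
theorem relatively_fake_spec : Claim_equal_relatively_fake := by
  intro pair lst _
  unfold Spec_relatively_fake relatively_fake relatively_fake_alt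
  rw [rfLoop_eq, any_iff_count1 pair.1 pair.2 lst, any_iff_count2 pair.1 pair.2 lst]
  simp
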